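-- pv_equiv track=rewrite | github.com/rksersewal-ai/LDO-2-2 | backend/documents/serializers.py | _normalize_revision
-- ===== SOURCE A (Python) =====
-- def _normalize_revision(label: str | None) -> int:
--     if not label:
--         return 1
--     digits = "".join(
--         character if character.isdigit() else " " for character in label
--     ).split()
--     if not digits:
--         return 1
--     try:
--         return max(int(digits[0]), 1)
--     except ValueError:
--         return 1
-- ===== SOURCE B (Python) =====
-- import re
--
--
-- def _normalize_revision(label):
--     if not label:
--         return 1
--     m = re.search(r"\d+", label)
--     if m is None:
--         return 1
--     return max(int(m.group()), 1)
-- ===== Notes on version B (the rewrite author's own statement) =====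
-- stated objective: idiomatic
-- what changed: Replaces A's mask-every-character/join/split/int-of-first-token pipeline (with a dead try/except) by a direct regex search for the first digit run, taking max(int(run),1).
import Mathlib
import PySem

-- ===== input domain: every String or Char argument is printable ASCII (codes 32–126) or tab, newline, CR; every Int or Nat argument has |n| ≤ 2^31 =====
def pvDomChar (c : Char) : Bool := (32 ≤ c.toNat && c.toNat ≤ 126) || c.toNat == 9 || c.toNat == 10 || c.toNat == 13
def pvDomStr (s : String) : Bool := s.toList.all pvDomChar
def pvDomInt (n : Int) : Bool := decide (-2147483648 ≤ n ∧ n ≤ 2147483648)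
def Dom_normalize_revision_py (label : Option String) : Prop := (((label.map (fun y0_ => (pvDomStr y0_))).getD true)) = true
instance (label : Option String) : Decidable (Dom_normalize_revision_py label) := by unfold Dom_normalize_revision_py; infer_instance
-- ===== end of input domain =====

-- B replaces A's mask/join/split/int-of-first-token pipeline by a direct scan
-- for the first digit run (Python: re.search(r"\d+")); same values, more idiomatic.


-- ===== PORT A =====
-- 'character if character.isdigit() else " "' applied to each character
def pvMask (c : Char) : Char := if PySem.Chars.isdigit c then c else ' '

def normalize_revision_py (label : Option String) : Int :=
  match label with
  | none => 1
  | some s =>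
    if s.toList.isEmpty then 1
    else
      match PySem.Chars.split₀ (s.toList.map pvMask) with
      | [] => 1
      | d :: _ =>
        match PySem.Int.ofChars? d with   -- int(digits[0]); none = ValueError, caught by A's except
        | some n => max n 1
        | none => 1

-- ===== PORT B =====
-- hand port of re.search(r"\d+", label): the first maximal run of ASCII digits (exact on the ASCII domain)
def pvFirstDigitRun : List Char → List Char
  | [] => []
  | c :: cs =>
    if PySem.Chars.isdigit c then c :: cs.takeWhile PySem.Chars.isdigit
    else pvFirstDigitRun cs

def normalize_revision_py_alt (label : Option String) : Int :=
  match label with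
  | none => 1
  | some s =>
    if s.toList.isEmpty then 1
    else
      match pvFirstDigitRun s.toList with
      | [] => 1                                        -- m is None
      | run => max ((PySem.Int.ofChars? run).getD 1) 1 -- int(m.group()); never fails on a digit run, getD only totalizes

-- ===== PRECONDITION & SPEC =====
def Spec_normalize_revision_py (label : Option String) (out : Int) : Prop := out = normalize_revision_py_alt label
instance (label : Option String) (out : Int) : Decidable (Spec_normalize_revision_py label out) := by unfold Spec_normalize_revision_py; infer_instance

-- ===== CLAIM (what is proved, stated in full; the proofs are below) =====
def Claim_equal_normalize_revision_py : Prop := ∀ (label : Option String), Dom_normalize_revision_py label → Spec_normalize_revision_py label (normalize_revision_py label)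

-- ===== LEMMAS AND PROOFS =====
theorem pv_digit_not_space (c : Char) (h : PySem.Chars.isdigit c = true) :
    PySem.Chars.isspace c = false := by
  simp [PySem.Chars.isdigit, Char.le_def, UInt32.le_iff_toNat_le] at h
  simp only [PySem.Chars.isspace, Bool.or_eq_false_iff, Bool.and_eq_false_iff,
    decide_eq_false_iff_not, Char.toNat]
  have he : c.val.toNat = c.toNat := rfl
  omega

theorem pv_go_head (rest cur : List Char) (acc : List (List Char)) (w : List Char) :
    (PySem.Chars.split₀.go rest cur (acc ++ [w])).head? = some w := by
  induction rest generalizing cur acc with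
  | nil =>
    simp only [PySem.Chars.split₀.go]
    split <;> simp
  | cons c rest ih =>
    simp only [PySem.Chars.split₀.go]
    split
    · split
      · exact ih [] acc
      · have : (cur.reverse :: (acc ++ [w])) = (cur.reverse :: acc) ++ [w] := by simp
        rw [this]; exact ih [] (cur.reverse :: acc)
    · exact ih (c :: cur) acc

theorem pv_run_phase (rest : List Char) : ∀ cur : List Char, cur ≠ [] →
    (PySem.Chars.split₀.go (rest.map pvMask) cur []).head? =
      some (cur.reverse ++ rest.takeWhile PySem.Chars.isdigit) := by
  induction rest with
  | nil =>
    intro cur hc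
    simp only [List.map_nil, PySem.Chars.split₀.go, List.takeWhile_nil, List.append_nil]
    simp [List.isEmpty_iff, hc]
  | cons c rest ih =>
    intro cur hc
    by_cases hd : PySem.Chars.isdigit c = true
    · simp only [List.map_cons, pvMask, hd, if_true, PySem.Chars.split₀.go,
        pv_digit_not_space c hd, Bool.false_eq_true, if_false, List.takeWhile_cons_of_pos]
      rw [ih (c :: cur) (by simp)]
      simp
    · have hm : pvMask c = ' ' := by simp [pvMask, hd]
      have hs : PySem.Chars.isspace ' ' = true := by decide
      simp only [List.map_cons, hm, PySem.Chars.split₀.go, hs, if_true,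
        List.isEmpty_iff, hc]
      have := pv_go_head (rest.map pvMask) [] [] cur.reverse
      simp at this
      rw [List.takeWhile_cons_of_neg (by simp [hd])]
      simp [this]

theorem pv_skip_phase (l : List Char) :
    (PySem.Chars.split₀.go (l.map pvMask) [] []).head? =
      if pvFirstDigitRun l = [] then none else some (pvFirstDigitRun l) := by
  induction l with
  | nil => simp [PySem.Chars.split₀.go, pvFirstDigitRun]
  | cons c l ih =>
    by_cases hd : PySem.Chars.isdigit c = true
    · simp only [List.map_cons, pvMask, hd, if_true, PySem.Chars.split₀.go,
        pv_digit_not_space c hd, Bool.false_eq_true, if_false]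
      rw [pv_run_phase l [c] (by simp)]
      simp [pvFirstDigitRun, hd]
    · have hm : pvMask c = ' ' := by simp [pvMask, hd]
      have hs : PySem.Chars.isspace ' ' = true := by decide
      simp only [List.map_cons, hm, PySem.Chars.split₀.go, hs, if_true]
      simpa [pvFirstDigitRun, hd] using ih

-- ===== VERDICT (by name: the statement is the Claim_ definition above) =====
theorem normalize_revision_py_spec : Claim_equal_normalize_revision_py := by
  intro label _
  unfold Spec_normalize_revision_py normalize_revision_py normalize_revision_py_alt
  cases label with
  | none => rfl
  | some s =>
    by_cases he : s.toList.isEmpty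
    · simp [he]
    · simp only [he, if_false, Bool.false_eq_true]
      have h := pv_skip_phase s.toList
      rw [show PySem.Chars.split₀ (s.toList.map pvMask) =
            PySem.Chars.split₀.go (s.toList.map pvMask) [] [] from rfl] at *
      cases hr : pvFirstDigitRun s.toList with
      | nil =>
        rw [hr] at h; simp at h
        rw [h]
      | cons r rs =>
        rw [hr] at h; simp at h
        obtain ⟨tail, htail⟩ := List.head?_eq_some_iff.mp h
        rw [htail]
        cases ho : PySem.Int.ofChars? (r :: rs) with
        | none => simp [ho]
        | some n => simp [ho]
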